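-- pv_equiv track=rewrite | github.com/IanJohnsons/mysterium-toolkit | scripts/migrate_data.py | _merge_snapshot_list
-- ===== SOURCE A (Python) =====
-- def _merge_snapshot_list(dest_data, src_data, key: str):
--     """
--     Merge two lists of dicts, deduplicating by `key` field.
--     Returns merged list sorted by key ascending.
--     """
--     by_key = {}
--     for item in (src_data or []):
--         if isinstance(item, dict) and key in item:
--             by_key[item[key]] = item
--     for item in (dest_data or []):
--         if isinstance(item, dict) and key in item:
--             by_key[item[key]] = item   # dest wins on collision
--     return sorted(by_key.values(), key=lambda x: x.get(key, ''))
-- ===== SOURCE B (Python) =====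
-- def _merge_snapshot_list(dest_data, src_data, key: str):
--     """
--     Merge two lists of dicts, deduplicating by `key` field.
--     Returns merged list sorted by key ascending.
--     Strategy: filter, concatenate (src first, dest second), one stable sort
--     by the key field, then a single right-to-left scan keeping the last item
--     of each run of equal keys (= dest wins, last duplicate wins).
--     """
--     items = [it for it in (src_data or []) if isinstance(it, dict) and key in it]
--     items += [it for it in (dest_data or []) if isinstance(it, dict) and key in it]
--     items.sort(key=lambda x: x.get(key, ''))
--     out = []
--     for it in reversed(items):
--         if not out or out[0].get(key, '') != it.get(key, ''):
--             out.insert(0, it)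
--     return out
-- ===== Notes on version B (the rewrite author's own statement) =====
-- stated objective: alternative
-- what changed: Replaces the hash-dict index (insert-overwrite per key, then sort the values) by filter + concatenate (src before dest) + one stable sort by the key field + a single adjacency scan that keeps the last item of each equal-key run, which by stability is the last dest duplicate (else last src).
import Mathlib
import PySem

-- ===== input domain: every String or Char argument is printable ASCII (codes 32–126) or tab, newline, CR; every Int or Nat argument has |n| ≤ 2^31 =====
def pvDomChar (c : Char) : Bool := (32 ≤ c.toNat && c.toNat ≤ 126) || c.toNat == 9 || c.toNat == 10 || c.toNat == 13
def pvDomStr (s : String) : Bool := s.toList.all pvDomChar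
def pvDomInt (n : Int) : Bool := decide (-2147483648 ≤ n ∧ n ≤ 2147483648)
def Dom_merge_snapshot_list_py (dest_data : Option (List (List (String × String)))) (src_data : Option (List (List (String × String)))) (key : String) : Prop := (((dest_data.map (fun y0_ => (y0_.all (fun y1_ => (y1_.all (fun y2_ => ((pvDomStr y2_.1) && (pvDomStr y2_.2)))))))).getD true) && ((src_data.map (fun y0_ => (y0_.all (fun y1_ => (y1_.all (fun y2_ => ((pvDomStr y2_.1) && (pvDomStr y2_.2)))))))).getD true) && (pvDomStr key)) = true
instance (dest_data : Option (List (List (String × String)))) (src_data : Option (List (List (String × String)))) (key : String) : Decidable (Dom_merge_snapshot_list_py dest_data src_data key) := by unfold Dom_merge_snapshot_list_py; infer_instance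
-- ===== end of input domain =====

-- B replaces A's dict index (insert-overwrite per key, then sort the values) by one stable
-- sort of the filtered concatenation (src first, dest second) followed by a single scan that
-- keeps the last item of each equal-key run; alternative decomposition, same asymptotic cost.


-- ===== PORT A =====
def merge_snapshot_list_py (dest_data : Option (List (List (String × String)))) (src_data : Option (List (List (String × String)))) (key : String) : List (List (String × String)) :=
  -- by_key = {}; for item in (src_data or []): if key in item: by_key[item[key]] = item
  let step := fun (d : PySem.Dict String (List (String × String))) (item : List (String × String)) =>
    if (PySem.Dict.mk item).contains key then
      d.insert (((PySem.Dict.mk item).get? key).getD "") item   -- item[key]; defined: the guard holds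
    else d
  let by_key := (src_data.getD []).foldl step PySem.Dict.empty
  -- for item in (dest_data or []): … (dest wins on collision)
  let by_key := (dest_data.getD []).foldl step by_key
  -- sorted(by_key.values(), key=lambda x: x.get(key, ''))
  PySem.List.sorted by_key.values (fun x => (PySem.Dict.mk x).getD key "") false

-- ===== PORT B =====
def merge_snapshot_list_py_alt (dest_data : Option (List (List (String × String)))) (src_data : Option (List (List (String × String)))) (key : String) : List (List (String × String)) :=
  -- items = [src items with key] + [dest items with key]
  let items := ((src_data.getD []).filter (fun it => (PySem.Dict.mk it).contains key))
            ++ ((dest_data.getD []).filter (fun it => (PySem.Dict.mk it).contains key))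
  -- items.sort(key=lambda x: x.get(key, ''))  (stable)
  let s := PySem.List.sorted items (fun x => (PySem.Dict.mk x).getD key "") false
  -- for it in reversed(items): if not out or out[0].get(key,'') != it.get(key,''): out.insert(0, it)
  s.foldr (fun it out =>
      match out with
      | [] => [it]
      | o :: _ => if (PySem.Dict.mk o).getD key "" == (PySem.Dict.mk it).getD key "" then out else it :: out) []

-- ===== PRECONDITION & SPEC =====
def Spec_merge_snapshot_list_py (dest_data : Option (List (List (String × String)))) (src_data : Option (List (List (String × String)))) (key : String) (out : List (List (String × String))) : Prop := out = merge_snapshot_list_py_alt dest_data src_data key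
instance (dest_data : Option (List (List (String × String)))) (src_data : Option (List (List (String × String)))) (key : String) (out : List (List (String × String))) : Decidable (Spec_merge_snapshot_list_py dest_data src_data key out) := by unfold Spec_merge_snapshot_list_py; infer_instance

-- ===== CLAIM (what is proved, stated in full; the proofs are below) =====
def Claim_equal_merge_snapshot_list_py : Prop := ∀ (dest_data : Option (List (List (String × String)))) (src_data : Option (List (List (String × String)))) (key : String), Dom_merge_snapshot_list_py dest_data src_data key → Spec_merge_snapshot_list_py dest_data src_data key (merge_snapshot_list_py dest_data src_data key)

-- ===== LEMMAS AND PROOFS =====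

-- key extractor x.get(key, '')
def pvKF (key : String) (x : List (String × String)) : String := (PySem.Dict.mk x).getD key ""
-- dict-building step on an item known to contain the key
def pvINS (key : String) (d : PySem.Dict String (List (String × String))) (item : List (String × String)) : PySem.Dict String (List (String × String)) := d.insert (pvKF key item) item
-- B's run-collapsing scan (right to left, keep the first-from-right = last of each run)
def pvStep (key : String) (it : List (String × String)) (out : List (List (String × String))) : List (List (String × String)) :=
  match out with
  | [] => [it]
  | o :: _ => if pvKF key o == pvKF key it then out else it :: out
def pvCollapse (key : String) (s : List (List (String × String))) : List (List (String × String)) := s.foldr (pvStep key) []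
-- replace the (unique) item with x's key by x
def pvRepl (key : String) (x v : List (String × String)) : List (String × String) := if pvKF key v == pvKF key x then x else v
-- insertion step of the stable sort
def pvInsB (key : String) (x : List (String × String)) (s : List (List (String × String))) : List (List (String × String)) :=
  PySem.List.insertBy (fun a b => decide (pvKF key a < pvKF key b)) x s

theorem pv_portB_eq (dest_data src_data : Option (List (List (String × String)))) (key : String) :
    merge_snapshot_list_py_alt dest_data src_data key =
    pvCollapse key (PySem.List.sorted
      (((src_data.getD []).filter (fun it => (PySem.Dict.mk it).contains key))
        ++ ((dest_data.getD []).filter (fun it => (PySem.Dict.mk it).contains key))) (pvKF key) false) := by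
  rfl

theorem pv_foldl_guard (key : String) (l : List (List (String × String))) (d : PySem.Dict String (List (String × String))) :
    l.foldl (fun d item => if (PySem.Dict.mk item).contains key then
        d.insert (((PySem.Dict.mk item).get? key).getD "") item else d) d
      = (l.filter (fun it => (PySem.Dict.mk it).contains key)).foldl (pvINS key) d := by
  induction l generalizing d with
  | nil => rfl
  | cons a t ih =>
    have e : d.insert (((PySem.Dict.mk a).get? key).getD "") a = pvINS key d a := by
      rw [pvINS, pvKF, PySem.Dict.getD_eq_get?_getD]
    simp only [List.foldl_cons, List.filter_cons]
    by_cases h : (PySem.Dict.mk a).contains key = true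
    · rw [if_pos h, if_pos h, e, List.foldl_cons, ih]
    · rw [if_neg h, if_neg h, ih]

theorem pv_portA_eq (dest_data src_data : Option (List (List (String × String)))) (key : String) :
    merge_snapshot_list_py dest_data src_data key =
    PySem.List.sorted ((((src_data.getD []).filter (fun it => (PySem.Dict.mk it).contains key))
        ++ ((dest_data.getD []).filter (fun it => (PySem.Dict.mk it).contains key))).foldl (pvINS key) PySem.Dict.empty).values
      (pvKF key) false := by
  show PySem.List.sorted _ _ false = _
  rw [List.foldl_append]
  rw [show (fun (x : List (String × String)) => (PySem.Dict.mk x).getD key "") = pvKF key from rfl]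
  rw [pv_foldl_guard, pv_foldl_guard]

-- items of the built dict pair each value with its own key field
theorem pv_items_inv (key : String) (l : List (List (String × String))) (d : PySem.Dict String (List (String × String)))
    (hd : ∀ p ∈ d.items, p.1 = pvKF key p.2) :
    ∀ p ∈ (l.foldl (pvINS key) d).items, p.1 = pvKF key p.2 := by
  induction l generalizing d with
  | nil => exact hd
  | cons a t ih =>
    refine ih _ ?_
    intro p hp
    rcases (PySem.Dict.mem_items_insert d (pvKF key a) a p).1 hp with h | h
    · rw [h]
    · exact hd p h.1

theorem pv_keys_built (key : String) (l : List (List (String × String))) :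
    (l.foldl (pvINS key) PySem.Dict.empty).keys = PySem.Set.ofList (l.map (pvKF key)) := by
  have := PySem.Dict.keys_foldl_insert_key l (pvKF key) (fun _ x => x) PySem.Dict.empty
  simpa [pvINS, PySem.Set.update, PySem.Set.ofList] using this

-- values after an overwriting insert: replace in place
theorem pv_values_insert_contains (key : String) (d : PySem.Dict String (List (String × String))) (x : List (String × String))
    (hinv : ∀ p ∈ d.items, p.1 = pvKF key p.2) (h : d.contains (pvKF key x) = true) :
    (d.insert (pvKF key x) x).values = d.values.map (pvRepl key x) := by
  rw [PySem.Dict.values, PySem.Dict.values, PySem.Dict.items_insert_of_contains d x h, List.map_map, List.map_map]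
  apply List.map_congr_left
  intro p hp
  have h1 := hinv p hp
  by_cases hb : p.1 = pvKF key x
  · simp [Function.comp, hb, pvRepl, ← h1]
  · have hb2 : ¬ (pvKF key p.2 = pvKF key x) := by rw [← h1]; exact hb
    simp [Function.comp, hb, pvRepl, hb2]

theorem pv_values_insert_not (key : String) (d : PySem.Dict String (List (String × String))) (x : List (String × String))
    (h : d.contains (pvKF key x) = false) :
    (d.insert (pvKF key x) x).values = d.values ++ [x] := by
  rw [PySem.Dict.values, PySem.Dict.values, PySem.Dict.items_insert_of_not_contains d x h, List.map_append]
  rfl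

-- small-step equations (definitional, restated with Prop conditions)
theorem pv_step_cons (key : String) (it o : List (String × String)) (r : List (List (String × String))) :
    pvStep key it (o :: r) = if pvKF key o = pvKF key it then o :: r else it :: o :: r := by
  show (if (pvKF key o == pvKF key it) = true then _ else _) = _
  simp only [beq_iff_eq]


-- sorted of an appended element = insertBy into sorted
theorem pv_sorted_append (key : String) (v : List (List (String × String))) (x : List (String × String)) :
    PySem.List.sorted (v ++ [x]) (pvKF key) false = pvInsB key x (PySem.List.sorted v (pvKF key) false) := by
  rw [PySem.List.sorted_eq_foldl_insertBy, PySem.List.sorted_eq_foldl_insertBy, List.foldl_append]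
  rfl

theorem pv_insB_cons (key : String) (x w : List (String × String)) (t : List (List (String × String))) :
    pvInsB key x (w :: t) = if pvKF key x < pvKF key w then x :: w :: t else w :: pvInsB key x t := by
  show (if decide (pvKF key x < pvKF key w) = true then _ else _) = _
  simp only [decide_eq_true_eq]
  rfl

theorem pv_insB_map (key : String) (g : List (String × String) → List (String × String))
    (hg : ∀ y, pvKF key (g y) = pvKF key y) (x : List (String × String)) (ws : List (List (String × String))) :
    pvInsB key (g x) (ws.map g) = (pvInsB key x ws).map g := by
  induction ws with
  | nil => rfl
  | cons w t ih =>
    rw [List.map_cons, pv_insB_cons, pv_insB_cons]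
    simp only [hg]
    by_cases h : pvKF key x < pvKF key w
    · rw [if_pos h, if_pos h, List.map_cons, List.map_cons]
    · rw [if_neg h, if_neg h, List.map_cons, ih]

theorem pv_sorted_map (key : String) (g : List (String × String) → List (String × String))
    (hg : ∀ y, pvKF key (g y) = pvKF key y) (v : List (List (String × String))) :
    PySem.List.sorted (v.map g) (pvKF key) false = (PySem.List.sorted v (pvKF key) false).map g := by
  induction v using List.reverseRecOn with
  | nil => rfl
  | append_singleton t x ih =>
    rw [List.map_append, List.map_singleton, pv_sorted_append, pv_sorted_append, ih, pv_insB_map key g hg]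

-- collapse facts
theorem pv_collapse_head (key : String) (a : List (String × String)) (t : List (List (String × String))) :
    ∃ o r, pvCollapse key (a :: t) = o :: r ∧ pvKF key o = pvKF key a := by
  show ∃ o r, pvStep key a (pvCollapse key t) = o :: r ∧ _
  cases h : pvCollapse key t with
  | nil => exact ⟨a, [], by simp [pvStep], rfl⟩
  | cons o r =>
    by_cases he : pvKF key o == pvKF key a
    · exact ⟨o, r, by simp [pvStep, he], by simpa using he⟩
    · exact ⟨a, o :: r, by simp [pvStep, he], rfl⟩

theorem pv_mem_collapse (key : String) (s : List (List (String × String))) :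
    ∀ y ∈ pvCollapse key s, y ∈ s := by
  induction s with
  | nil => simp [pvCollapse]
  | cons a t ih =>
    intro y hy
    have hy' : y ∈ pvStep key a (pvCollapse key t) := hy
    cases h : pvCollapse key t with
    | nil => simp [pvStep, h] at hy'; simp [hy']
    | cons o r =>
      rw [h] at hy'
      by_cases he : pvKF key o == pvKF key a
      · simp only [pvStep, he, if_pos] at hy'
        have : y ∈ pvCollapse key t := by rw [h]; exact hy'
        exact List.mem_cons_of_mem _ (ih y this)
      · rw [pvStep] at hy'
        simp only [he, Bool.false_eq_true, if_false, List.mem_cons] at hy'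
        rcases hy' with h1 | h1 | h1
        · simp [h1]
        · have : y ∈ pvCollapse key t := by rw [h]; simp [h1]
          exact List.mem_cons_of_mem _ (ih y this)
        · have : y ∈ pvCollapse key t := by rw [h]; simp [h1]
          exact List.mem_cons_of_mem _ (ih y this)

theorem pv_collapse_head_eq (key : String) (t : List (List (String × String))) (o : List (String × String))
    (r : List (List (String × String))) (hct : pvCollapse key t = o :: r) :
    ∃ c u, t = c :: u ∧ pvKF key o = pvKF key c := by
  cases t with
  | nil => cases hct
  | cons c u =>
    obtain ⟨o', r', h1, h2⟩ := pv_collapse_head key c u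
    rw [h1] at hct
    injection hct with ho _
    exact ⟨c, u, rfl, ho ▸ h2⟩

theorem pv_repl_of_eq (key : String) (x v : List (String × String)) (h : pvKF key v = pvKF key x) :
    pvRepl key x v = x := by rw [pvRepl]; simp [h]

theorem pv_repl_of_ne (key : String) (x v : List (String × String)) (h : ¬ pvKF key v = pvKF key x) :
    pvRepl key x v = v := by rw [pvRepl]; simp [h]

theorem pv_repl_key (key : String) (x y : List (String × String)) :
    pvKF key (pvRepl key x y) = pvKF key y := by
  by_cases h : pvKF key y = pvKF key x
  · rw [pv_repl_of_eq key x y h, h]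
  · rw [pv_repl_of_ne key x y h]

-- the central lemma: collapsing after a stable insertion
theorem pv_collapse_insB (key : String) (x : List (String × String)) (s : List (List (String × String)))
    (hs : s.Pairwise (fun a b => pvKF key a ≤ pvKF key b)) :
    pvCollapse key (pvInsB key x s) =
      if pvKF key x ∈ s.map (pvKF key) then (pvCollapse key s).map (pvRepl key x)
      else pvInsB key x (pvCollapse key s) := by
  induction s with
  | nil => rw [if_neg (by simp)]; rfl
  | cons a t ih =>
    rw [List.pairwise_cons] at hs
    obtain ⟨ha, ht⟩ := hs
    rw [pv_insB_cons]
    by_cases hxa : pvKF key x < pvKF key a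
    · rw [if_pos hxa]
      obtain ⟨o, r, hor, hko⟩ := pv_collapse_head key a t
      have hlhs : pvCollapse key (x :: a :: t) = x :: pvCollapse key (a :: t) := by
        show pvStep key x (pvCollapse key (a :: t)) = _
        rw [hor, pv_step_cons, if_neg (by rw [hko]; exact ne_of_gt hxa)]
      have hnotmem : pvKF key x ∉ (a :: t).map (pvKF key) := by
        simp only [List.map_cons, List.mem_cons]
        push_neg
        refine ⟨ne_of_lt hxa, fun h => ?_⟩
        obtain ⟨b, hb, hbe⟩ := List.mem_map.1 h
        have hab := ha b hb
        rw [hbe] at hab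
        exact absurd (lt_of_le_of_lt hab hxa) (lt_irrefl _)
      rw [if_neg hnotmem, hlhs, hor, pv_insB_cons, if_pos (by rw [hko]; exact hxa)]
    · rw [if_neg hxa]
      have hax : pvKF key a ≤ pvKF key x := le_of_not_gt hxa
      rw [show pvCollapse key (a :: pvInsB key x t) = pvStep key a (pvCollapse key (pvInsB key x t)) from rfl]
      rw [ih ht]
      by_cases hmt : pvKF key x ∈ t.map (pvKF key)
      · rw [if_pos hmt, if_pos (by simp only [List.map_cons, List.mem_cons]; exact Or.inr hmt)]
        cases hct : pvCollapse key t with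
        | nil =>
          cases t with
          | nil => simp at hmt
          | cons c u =>
            obtain ⟨o', r', h1, _⟩ := pv_collapse_head key c u
            rw [h1] at hct
            cases hct
        | cons o r =>
          have hrhs : pvCollapse key (a :: t) = pvStep key a (o :: r) := by
            show pvStep key a (pvCollapse key t) = _
            rw [hct]
          rw [hrhs, List.map_cons, pv_step_cons, pv_repl_key, pv_step_cons]
          by_cases hoa : pvKF key o = pvKF key a
          · rw [if_pos hoa, if_pos hoa, List.map_cons]
          · rw [if_neg hoa, if_neg hoa, List.map_cons, List.map_cons]
            have hane : ¬ pvKF key a = pvKF key x := by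
              intro he
              obtain ⟨c, u, htc, hoc⟩ := pv_collapse_head_eq key t o r hct
              obtain ⟨b, hb, hbe⟩ := List.mem_map.1 hmt
              subst htc
              rw [List.pairwise_cons] at ht
              have hcb : pvKF key c ≤ pvKF key b := by
                rcases List.mem_cons.1 hb with h1 | h1
                · rw [h1]
                · exact ht.1 b h1
              have hac : pvKF key a ≤ pvKF key c := ha c (by simp)
              have hca : pvKF key c = pvKF key a := le_antisymm (by rw [he, ← hbe]; exact hcb) hac
              exact hoa (by rw [hoc, hca])
            rw [pv_repl_of_ne key x a hane]
      · rw [if_neg hmt]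
        by_cases hxa2 : pvKF key x = pvKF key a
        · rw [if_pos (by simp only [List.map_cons, List.mem_cons]; exact Or.inl hxa2)]
          rw [show pvCollapse key (a :: t) = pvStep key a (pvCollapse key t) from rfl]
          cases hct : pvCollapse key t with
          | nil =>
            rw [show pvInsB key x [] = [x] from rfl, pv_step_cons, if_pos hxa2]
            rw [show pvStep key a ([] : List (List (String × String))) = [a] from rfl, List.map_cons,
              List.map_nil, pv_repl_of_eq key x a hxa2.symm]
          | cons o r =>
            have ho_t : o ∈ t := pv_mem_collapse key t o (by rw [hct]; simp)
            have hone : ¬ pvKF key o = pvKF key x := fun hh => hmt (List.mem_map.2 ⟨o, ho_t, hh⟩)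
            have hko : pvKF key x < pvKF key o := by
              have h1 : pvKF key a ≤ pvKF key o := ha o ho_t
              rw [← hxa2] at h1
              exact lt_of_le_of_ne h1 (fun hh => hone hh.symm)
            rw [pv_insB_cons, if_pos hko, pv_step_cons, if_pos hxa2, pv_step_cons]
            have hoa : ¬ pvKF key o = pvKF key a := by rw [← hxa2]; exact hone
            rw [if_neg hoa, List.map_cons, List.map_cons]
            rw [pv_repl_of_eq key x a hxa2.symm, pv_repl_of_ne key x o hone]
            have hmapr : r.map (pvRepl key x) = r := by
              have hcong : ∀ y ∈ r, pvRepl key x y = id y := by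
                intro y hy
                have hyt : y ∈ t := pv_mem_collapse key t y (by rw [hct]; exact List.mem_cons_of_mem _ hy)
                exact pv_repl_of_ne key x y (fun hh => hmt (List.mem_map.2 ⟨y, hyt, hh⟩))
              rw [List.map_congr_left hcong, List.map_id]
            rw [hmapr]
        · rw [if_neg (by simp only [List.map_cons, List.mem_cons]; push_neg; exact ⟨hxa2, hmt⟩)]
          have hlt : pvKF key a < pvKF key x := lt_of_le_of_ne hax (fun hh => hxa2 hh.symm)
          rw [show pvCollapse key (a :: t) = pvStep key a (pvCollapse key t) from rfl]
          cases hct : pvCollapse key t with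
          | nil =>
            rw [show pvInsB key x [] = [x] from rfl, pv_step_cons, if_neg hxa2]
            rw [show pvStep key a ([] : List (List (String × String))) = [a] from rfl,
              pv_insB_cons, if_neg (not_lt_of_gt hlt)]
            rfl
          | cons o r =>
            by_cases hxo : pvKF key x < pvKF key o
            · rw [pv_insB_cons, if_pos hxo, pv_step_cons, if_neg hxa2, pv_step_cons]
              have hoa : ¬ pvKF key o = pvKF key a := fun hh => absurd (hh ▸ hxo) (not_lt_of_gt hlt)
              rw [if_neg hoa, pv_insB_cons, if_neg (not_lt_of_gt hlt), pv_insB_cons, if_pos hxo]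
            · rw [pv_insB_cons, if_neg hxo, pv_step_cons, pv_step_cons]
              by_cases hoa : pvKF key o = pvKF key a
              · rw [if_pos hoa, if_pos hoa, pv_insB_cons, if_neg hxo]
              · rw [if_neg hoa, if_neg hoa, pv_insB_cons, if_neg (not_lt_of_gt hlt), pv_insB_cons, if_neg hxo]

-- main: A's sorted dict values = B's collapse of the sorted input
theorem pv_main (key : String) (l : List (List (String × String))) :
    PySem.List.sorted (l.foldl (pvINS key) PySem.Dict.empty).values (pvKF key) false
      = pvCollapse key (PySem.List.sorted l (pvKF key) false) := by
  induction l using List.reverseRecOn with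
  | nil => rfl
  | append_singleton t x ih =>
    rw [List.foldl_append, List.foldl_cons, List.foldl_nil, pv_sorted_append,
      pv_collapse_insB key x _ (PySem.List.sorted_pairwise t (pvKF key))]
    have hinv := pv_items_inv key t PySem.Dict.empty (by intro p hp; cases hp)
    have hkeys : (t.foldl (pvINS key) PySem.Dict.empty).contains (pvKF key x) = true ↔
        pvKF key x ∈ (PySem.List.sorted t (pvKF key) false).map (pvKF key) := by
      rw [PySem.Dict.contains_iff_mem_keys, pv_keys_built, PySem.Set.mem_ofList]
      constructor
      · intro h
        obtain ⟨b, hb, hbe⟩ := List.mem_map.1 h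
        exact List.mem_map.2 ⟨b, (PySem.List.mem_sorted t (pvKF key) false b).2 hb, hbe⟩
      · intro h
        obtain ⟨b, hb, hbe⟩ := List.mem_map.1 h
        exact List.mem_map.2 ⟨b, (PySem.List.mem_sorted t (pvKF key) false b).1 hb, hbe⟩
    by_cases hc : (t.foldl (pvINS key) PySem.Dict.empty).contains (pvKF key x) = true
    · rw [if_pos (hkeys.1 hc)]
      rw [show pvINS key (t.foldl (pvINS key) PySem.Dict.empty) x
            = (t.foldl (pvINS key) PySem.Dict.empty).insert (pvKF key x) x from rfl]
      rw [pv_values_insert_contains key _ x hinv hc,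
        pv_sorted_map key (pvRepl key x) (fun y => pv_repl_key key x y), ih]
    · rw [if_neg (fun hm => hc (hkeys.2 hm))]
      rw [show pvINS key (t.foldl (pvINS key) PySem.Dict.empty) x
            = (t.foldl (pvINS key) PySem.Dict.empty).insert (pvKF key x) x from rfl]
      rw [pv_values_insert_not key _ x (Bool.not_eq_true _ ▸ eq_false_of_ne_true hc), pv_sorted_append, ih]

-- ===== VERDICT (by name: the statement is the Claim_ definition above) =====
theorem merge_snapshot_list_py_spec : Claim_equal_merge_snapshot_list_py := by
  intro dest_data src_data key _
  show merge_snapshot_list_py dest_data src_data key = merge_snapshot_list_py_alt dest_data src_data key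
  rw [pv_portA_eq, pv_portB_eq, pv_main]
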